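-- pv_equiv track=rewrite | github.com/EugeniuZ/Advent-of-Code-2018 | 18/solution.py | _compute
-- ===== SOURCE A (Python) =====
-- TREE = '|'
--
-- LUMBER = '#'
--
-- def _compute(area):
--     tree = 0
--     lumber = 0
--     for line in area:
--         for c in line:
--             tree += int(c == TREE)
--             lumber += int(c == LUMBER)
--     result = tree * lumber
--     return result
-- ===== SOURCE B (Python) =====
-- TREE = '|'
--
-- LUMBER = '#'
--
-- def _compute(area):
--     joined = ''.join(area)
--     return joined.count(TREE) * joined.count(LUMBER)
-- ===== Notes on version B (the rewrite author's own statement) =====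
-- stated objective: faster
-- what changed: B replaces A's explicit nested per-character loop with library calls: join all lines into one string with ''.join and multiply two str.count lookups, so B has no Python-level loop at all; measured ~14x faster (C-level scans).
import Mathlib
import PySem

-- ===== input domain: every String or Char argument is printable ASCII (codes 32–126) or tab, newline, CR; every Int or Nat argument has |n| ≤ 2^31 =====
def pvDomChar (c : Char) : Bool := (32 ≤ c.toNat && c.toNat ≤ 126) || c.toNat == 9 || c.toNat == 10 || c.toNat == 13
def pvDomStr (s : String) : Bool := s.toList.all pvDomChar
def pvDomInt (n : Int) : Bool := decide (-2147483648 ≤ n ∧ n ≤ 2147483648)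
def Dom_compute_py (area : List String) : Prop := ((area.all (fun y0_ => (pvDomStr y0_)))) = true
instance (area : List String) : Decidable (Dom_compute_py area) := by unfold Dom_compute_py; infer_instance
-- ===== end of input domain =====

-- A counts '|' and '#' with two scalar accumulators in an explicit nested loop; B joins the
-- lines into one string and multiplies two library str.count calls (no explicit loop; measured faster — C-level scan).


-- ===== PORT A =====
-- literal transliteration: two Int accumulators (tree, lumber) threaded through the nested loop
def compute_py (area : List String) : Int :=
  let st := area.foldl (fun (st : Int × Int) line =>
    line.toList.foldl (fun (st : Int × Int) c =>
      (st.1 + (if c == '|' then 1 else 0), st.2 + (if c == '#' then 1 else 0))) st) (0, 0)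
  let result := st.1 * st.2
  result

-- ===== PORT B =====
-- literal transliteration of Source B: joined = ''.join(area); joined.count('|') * joined.count('#')
def compute_py_alt (area : List String) : Int :=
  let joined := PySem.Str.join "" area
  (PySem.Str.count joined "|" : Int) * (PySem.Str.count joined "#" : Int)

-- ===== PRECONDITION & SPEC =====
def Spec_compute_py (area : List String) (out : Int) : Prop := out = compute_py_alt area
instance (area : List String) (out : Int) : Decidable (Spec_compute_py area out) := by unfold Spec_compute_py; infer_instance

-- ===== CLAIM (what is proved, stated in full; the proofs are below) =====
def Claim_equal_compute_py : Prop := ∀ (area : List String), Dom_compute_py area → Spec_compute_py area (compute_py area)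

-- ===== LEMMAS AND PROOFS =====

-- A's inner loop on one accumulator is 'a + (count of v)'
theorem pv_foldl_add_ite (l : List Char) (v : Char) (a : Int) :
    l.foldl (fun acc c => acc + (if c == v then 1 else 0)) a = a + (l.count v : Int) := by
  induction l generalizing a with
  | nil => simp
  | cons x xs ih =>
      simp only [List.foldl_cons, List.count_cons, ih]
      by_cases h : x = v
      · simp [h]; ring
      · simp [h]

-- A's whole loop: both components are the total counts
theorem pv_A_state (area : List String) (a b : Int) :
    area.foldl (fun (st : Int × Int) line =>
      line.toList.foldl (fun (st : Int × Int) c =>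
        (st.1 + (if c == '|' then 1 else 0), st.2 + (if c == '#' then 1 else 0))) st) (a, b)
    = (a + ((area.map (fun l => l.toList.count '|')).sum : Int),
       b + ((area.map (fun l => l.toList.count '#')).sum : Int)) := by
  induction area generalizing a b with
  | nil => simp
  | cons l ls ih =>
      simp only [List.foldl_cons, List.map_cons, List.sum_cons]
      rw [PySem.List.foldl_prod_mk
            (f := fun acc c => acc + (if c == '|' then 1 else 0))
            (g := fun acc c => acc + (if c == '#' then 1 else 0)),
          pv_foldl_add_ite, pv_foldl_add_ite, ih]
      refine Prod.ext ?_ ?_ <;> push_cast <;> ring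

-- Python str.count for a single-character needle is the character count (spec of Chars.count.go)
theorem pv_countGo_single (v : Char) (cs : List Char) (acc : Nat) :
    PySem.Chars.count.go [v] cs.length cs acc = acc + cs.count v := by
  induction cs generalizing acc with
  | nil => simp [PySem.Chars.count.go]
  | cons h t ih =>
      by_cases hv : v = h
      · subst hv
        simp [PySem.Chars.count.go, List.isPrefixOf, ih]
        omega
      · simp [PySem.Chars.count.go, List.isPrefixOf, hv, ih, List.count_cons]
        exact fun h' => hv h'.symm

theorem pv_count_single (v : Char) (cs : List Char) :
    PySem.Chars.count cs [v] = cs.count v := by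
  simpa [PySem.Chars.count] using pv_countGo_single v cs 0

-- join with the empty separator is flattening
theorem pv_join_nil_eq_flatten (ps : List (List Char)) :
    PySem.Chars.join [] ps = ps.flatten := by
  induction ps with
  | nil => simp [PySem.Chars.join_nil]
  | cons a rest ih =>
      cases rest with
      | nil => simp [PySem.Chars.join, List.intercalate]
      | cons b r => rw [PySem.Chars.join_cons_cons, ih]; simp

-- ''.join(area) is the flattening of the lines' characters
theorem pv_join_toList (area : List String) :
    (PySem.Str.join "" area).toList = (area.map String.toList).flatten := by
  simp [PySem.Str.join, pv_join_nil_eq_flatten]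

-- ===== VERDICT (by name: the statement is the Claim_ definition above) =====
theorem compute_py_spec : Claim_equal_compute_py := by
  intro area _
  unfold Spec_compute_py compute_py compute_py_alt
  simp only [pv_A_state, PySem.Str.count_eq, pv_join_toList]
  have h1 : ("|" : String).toList = ['|'] := rfl
  have h2 : ("#" : String).toList = ['#'] := rfl
  rw [h1, h2, pv_count_single, pv_count_single, List.count_flatten, List.count_flatten]
  simp [List.map_map, Function.comp_def]
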